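-- pv_equiv track=rewrite | github.com/naufalbasara/python-algorithm-exercise | hackerrank/missingCharacters.py | missingCharacters
-- ===== SOURCE A (Python) =====
-- def missingCharacters(s):
--     numbers = {1, 2, 3, 4, 5, 6, 7, 8, 9, 0}
--     letters = {'a', 'b', 'c', 'd', 'e', 'f', 'g', 'h', 'i', 'j',
--                'k', 'l', 'm', 'n', 'o', 'p', 'q', 'r', 's', 't',
--                'u', 'v', 'w', 'x', 'y', 'z'}
--     num_input = set()
--     letters_input = set()
--
--     for _ in s:
--         num_input.add(int(_)) if _.isdigit() else letters_input.add(_)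
--     num_output = sorted(numbers.difference(num_input))
--     letter_output = sorted(letters.difference(letters_input))
--
--     output = ''
--     for v in num_output:
--         output += str(v)
--     for v in letter_output:
--         output += v
--
--     return output
-- ===== SOURCE B (Python) =====
-- def missingCharacters(s):
--     # single ordered pass over the known universe; membership test replaces
--     # the build-two-sets / set-difference / sort pipeline of A
--     return ''.join(c for c in '0123456789abcdefghijklmnopqrstuvwxyz' if c not in s)
-- ===== Notes on version B (the rewrite author's own statement) =====
-- stated objective: simpler
-- what changed: B drops A's two present-sets, set differences and sorts entirely: it filters the already-ordered 36-character digit+letter universe by a direct substring membership test on s and joins the survivors.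
import Mathlib
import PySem

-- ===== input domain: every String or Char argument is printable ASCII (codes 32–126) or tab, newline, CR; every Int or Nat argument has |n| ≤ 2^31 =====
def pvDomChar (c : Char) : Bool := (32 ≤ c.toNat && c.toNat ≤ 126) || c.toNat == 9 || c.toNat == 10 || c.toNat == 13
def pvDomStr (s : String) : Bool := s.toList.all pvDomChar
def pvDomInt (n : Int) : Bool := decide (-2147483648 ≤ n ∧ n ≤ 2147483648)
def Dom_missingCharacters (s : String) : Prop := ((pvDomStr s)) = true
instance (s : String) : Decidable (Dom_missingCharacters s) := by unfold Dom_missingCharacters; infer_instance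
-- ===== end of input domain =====

-- B replaces A's two present-sets / set-difference / sort pipeline with a single ordered
-- membership-filter pass over the fixed universe string (objective: simpler).

-- ===== PORT A =====
-- int(_) for the scanned character; only reached under the isdigit guard, where
-- PySem.Int.ofChars? returns `some` (exact there).
def pvDigitVal (c : Char) : Int := (PySem.Int.ofChars? [c]).getD 0

-- the body of A's `for _ in s` loop
def pvStep (p : PySem.Set Int × PySem.Set Char) (c : Char) : PySem.Set Int × PySem.Set Char :=
  if PySem.Chars.isdigit c then (PySem.Set.add p.1 (pvDigitVal c), p.2)
  else (p.1, PySem.Set.add p.2 c)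

def missingCharacters (s : String) : String :=
  let numbers : PySem.Set Int := PySem.Set.ofList [1,2,3,4,5,6,7,8,9,0]
  let letters : PySem.Set Char := PySem.Set.ofList
    ['a','b','c','d','e','f','g','h','i','j','k','l','m','n','o','p','q','r','s','t','u','v','w','x','y','z']
  let st := s.toList.foldl pvStep (PySem.Set.empty, PySem.Set.empty)
  let numOutput := PySem.List.sorted (PySem.Set.diff numbers st.1) (fun x => x)
  let letterOutput := PySem.List.sorted (PySem.Set.diff letters st.2) (fun x => x)
  let out1 := numOutput.foldl (fun acc v => acc ++ PySem.Int.toChars v) []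
  let out2 := letterOutput.foldl (fun acc v => acc ++ [v]) out1
  String.ofList out2

-- ===== PORT B =====
def missingCharacters_alt (s : String) : String :=
  String.ofList ((("0123456789abcdefghijklmnopqrstuvwxyz").toList).filter
    (fun c => !(PySem.Str.isIn (String.ofList [c]) s)))

-- ===== PRECONDITION & SPEC =====
def Spec_missingCharacters (s : String) (out : String) : Prop := out = missingCharacters_alt s
instance (s : String) (out : String) : Decidable (Spec_missingCharacters s out) := by unfold Spec_missingCharacters; infer_instance

-- ===== CLAIM (what is proved, stated in full; the proofs are below) =====
def Claim_equal_missingCharacters : Prop := ∀ (s : String), Dom_missingCharacters s → Spec_missingCharacters s (missingCharacters s)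

-- ===== LEMMAS AND PROOFS =====

-- what A's scan accumulates on the digit side: exactly the int values of the digit chars of s
theorem mem_fold1 (L : List Char) (p : PySem.Set Int × PySem.Set Char) (x : Int) :
    x ∈ (L.foldl pvStep p).1 ↔ x ∈ p.1 ∨ ∃ c ∈ L, PySem.Chars.isdigit c = true ∧ pvDigitVal c = x := by
  induction L generalizing p with
  | nil => simp
  | cons c L ih =>
    simp only [List.foldl_cons, ih, pvStep]
    by_cases h : PySem.Chars.isdigit c = true
    · simp only [h, if_true, PySem.Set.mem_add, List.mem_cons]
      constructor
      · rintro ((h1 | h1) | ⟨c', hc', h2, h3⟩)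
        · exact Or.inl h1
        · exact Or.inr ⟨c, Or.inl rfl, h, h1.symm⟩
        · exact Or.inr ⟨c', Or.inr hc', h2, h3⟩
      · rintro (h1 | ⟨c', hc' | hc', h2, h3⟩)
        · exact Or.inl (Or.inl h1)
        · subst hc'; exact Or.inl (Or.inr h3.symm)
        · exact Or.inr ⟨c', hc', h2, h3⟩
    · simp only [Bool.not_eq_true] at h
      simp only [h, Bool.false_eq_true, if_false, List.mem_cons]
      constructor
      · rintro (h1 | ⟨c', hc', h2, h3⟩)
        · exact Or.inl h1
        · exact Or.inr ⟨c', Or.inr hc', h2, h3⟩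
      · rintro (h1 | ⟨c', hc' | hc', h2, h3⟩)
        · exact Or.inl h1
        · subst hc'; rw [h] at h2; cases h2
        · exact Or.inr ⟨c', hc', h2, h3⟩

-- what A's scan accumulates on the letter side: exactly the non-digit chars of s
theorem mem_fold2 (L : List Char) (p : PySem.Set Int × PySem.Set Char) (c' : Char) :
    c' ∈ (L.foldl pvStep p).2 ↔ c' ∈ p.2 ∨ (c' ∈ L ∧ PySem.Chars.isdigit c' = false) := by
  induction L generalizing p with
  | nil => simp
  | cons c L ih =>
    simp only [List.foldl_cons, ih, pvStep]
    by_cases h : PySem.Chars.isdigit c = true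
    · simp only [h, if_true, List.mem_cons]
      constructor
      · rintro (h1 | ⟨h2, h3⟩)
        · exact Or.inl h1
        · exact Or.inr ⟨Or.inr h2, h3⟩
      · rintro (h1 | ⟨h2 | h2, h3⟩)
        · exact Or.inl h1
        · subst h2; rw [h] at h3; cases h3
        · exact Or.inr ⟨h2, h3⟩
    · simp only [Bool.not_eq_true] at h
      simp only [h, Bool.false_eq_true, if_false, PySem.Set.mem_add, List.mem_cons]
      constructor
      · rintro ((h1 | h1) | ⟨h2, h3⟩)
        · exact Or.inl h1
        · subst h1; exact Or.inr ⟨Or.inl rfl, h⟩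
        · exact Or.inr ⟨Or.inr h2, h3⟩
      · rintro (h1 | ⟨h2 | h2, h3⟩)
        · exact Or.inl (Or.inl h1)
        · subst h2; exact Or.inl (Or.inr rfl)
        · exact Or.inr ⟨h2, h3⟩

-- isdigit (which is exactly '0' ≤ c ≤ '9') pins the character to one of the ten digit chars
theorem digit_enum (c : Char) (h : PySem.Chars.isdigit c = true) :
    c ∈ ['0','1','2','3','4','5','6','7','8','9'] := by
  simp [PySem.Chars.isdigit] at h
  obtain ⟨h1, h2⟩ := h
  rw [Char.le_def, UInt32.le_iff_toNat_le] at h1 h2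
  have e0 : ('0' : Char).val.toNat = 48 := rfl
  have e9 : ('9' : Char).val.toNat = 57 := rfl
  have hc : ∀ (d : Char), c.val.toNat = d.val.toNat → c = d :=
    fun d hd => Char.ext (UInt32.toNat_inj.mp hd)
  have h3 : c.val.toNat = 48 ∨ c.val.toNat = 49 ∨ c.val.toNat = 50 ∨ c.val.toNat = 51 ∨
      c.val.toNat = 52 ∨ c.val.toNat = 53 ∨ c.val.toNat = 54 ∨ c.val.toNat = 55 ∨
      c.val.toNat = 56 ∨ c.val.toNat = 57 := by omega
  simp only [List.mem_cons, List.not_mem_nil, or_false]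
  rcases h3 with h|h|h|h|h|h|h|h|h|h
  · exact Or.inl (hc '0' h)
  · exact Or.inr (Or.inl (hc '1' h))
  · exact Or.inr (Or.inr (Or.inl (hc '2' h)))
  · exact Or.inr (Or.inr (Or.inr (Or.inl (hc '3' h))))
  · exact Or.inr (Or.inr (Or.inr (Or.inr (Or.inl (hc '4' h)))))
  · exact Or.inr (Or.inr (Or.inr (Or.inr (Or.inr (Or.inl (hc '5' h))))))
  · exact Or.inr (Or.inr (Or.inr (Or.inr (Or.inr (Or.inr (Or.inl (hc '6' h)))))))
  · exact Or.inr (Or.inr (Or.inr (Or.inr (Or.inr (Or.inr (Or.inr (Or.inl (hc '7' h))))))))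
  · exact Or.inr (Or.inr (Or.inr (Or.inr (Or.inr (Or.inr (Or.inr (Or.inr (Or.inl (hc '8' h)))))))))
  · exact Or.inr (Or.inr (Or.inr (Or.inr (Or.inr (Or.inr (Or.inr (Or.inr (Or.inr (hc '9' h)))))))))

-- single-character `c in s` is list membership
theorem isIn_singleton (c : Char) (L : List Char) :
    PySem.Chars.isIn [c] L = true ↔ c ∈ L := by
  rw [PySem.Chars.isIn_iff_infix]; exact List.singleton_infix_iff c L

-- transport of filter-then-concat from digit values back to digit characters
theorem flatMap_filter_map (ds : List Char) (p1 : Int → Bool) (q : Char → Bool)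
    (h : ∀ c ∈ ds, PySem.Int.toChars (pvDigitVal c) = [c] ∧ p1 (pvDigitVal c) = q c) :
    ((ds.map pvDigitVal).filter p1).flatMap PySem.Int.toChars = ds.filter q := by
  induction ds with
  | nil => rfl
  | cons c ds ih =>
    have hc := h c (List.mem_cons_self)
    have ih' := ih (fun c' hc' => h c' (List.mem_cons_of_mem _ hc'))
    simp only [List.map_cons, List.filter_cons, ← hc.2]
    by_cases hp : p1 (pvDigitVal c) = true
    · simp [hp, hc.1, ih']
    · simp only [Bool.not_eq_true] at hp
      simp [hp, ih']

-- ===== VERDICT (by name: the statement is the Claim_ definition above) =====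
theorem missingCharacters_spec : Claim_equal_missingCharacters := by
  intro s _hdom
  unfold Spec_missingCharacters missingCharacters missingCharacters_alt
  simp only [PySem.List.foldl_append_eq_flatMap, List.nil_append]
  set st := List.foldl pvStep (PySem.Set.empty, PySem.Set.empty) s.toList with hst
  have hmem1 : ∀ c ∈ ['0','1','2','3','4','5','6','7','8','9'],
      (PySem.Set.contains st.1 (pvDigitVal c)) = (PySem.Str.isIn (String.ofList [c]) s) := by
    intro c hc
    have hdig : PySem.Chars.isdigit c = true := by fin_cases hc <;> rfl
    have hinj : ∀ a ∈ ['0','1','2','3','4','5','6','7','8','9'],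
        ∀ b ∈ ['0','1','2','3','4','5','6','7','8','9'], pvDigitVal a = pvDigitVal b → a = b := by
      intro a ha b hb; fin_cases ha <;> fin_cases hb <;> simp [pvDigitVal] <;> decide
    rw [Bool.eq_iff_iff]
    simp only [PySem.Set.contains, List.contains_iff_mem, PySem.Str.isIn]
    have hcl : (String.ofList [c]).toList = [c] := by simp
    rw [hcl, isIn_singleton, hst, mem_fold1]
    simp only [PySem.Set.empty, List.not_mem_nil, false_or]
    constructor
    · rintro ⟨c', hc', h1, h2⟩
      rwa [hinj c' (digit_enum c' h1) c hc h2] at hc'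
    · intro hmem
      exact ⟨c, hmem, hdig, rfl⟩
  have hmem2 : ∀ c ∈ ['a','b','c','d','e','f','g','h','i','j','k','l','m','n','o','p','q','r','s','t','u','v','w','x','y','z'],
      (PySem.Set.contains st.2 c) = (PySem.Str.isIn (String.ofList [c]) s) := by
    intro c hc
    have hnd : PySem.Chars.isdigit c = false := by fin_cases hc <;> rfl
    rw [Bool.eq_iff_iff]
    simp only [PySem.Set.contains, List.contains_iff_mem, PySem.Str.isIn]
    have hcl : (String.ofList [c]).toList = [c] := by simp
    rw [hcl, isIn_singleton, hst, mem_fold2]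
    simp only [PySem.Set.empty, List.not_mem_nil, false_or]
    exact ⟨fun h => h.1, fun h => ⟨h, hnd⟩⟩
  have hnum : PySem.List.sorted (PySem.Set.diff (PySem.Set.ofList [1,2,3,4,5,6,7,8,9,0]) st.1) (fun x => x)
      = List.filter (fun x => !PySem.Set.contains st.1 x) [0,1,2,3,4,5,6,7,8,9] := by
    apply PySem.List.sorted_eq_of_perm_of_pairwise_lt
    · have hdf : PySem.Set.diff (PySem.Set.ofList [1,2,3,4,5,6,7,8,9,0]) st.1
          = List.filter (fun x => !PySem.Set.contains st.1 x) [1,2,3,4,5,6,7,8,9,0] := rfl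
      rw [hdf]
      exact List.Perm.filter _ (by decide)
    · exact List.Pairwise.filter _ (by decide)
  have hlet : PySem.List.sorted (PySem.Set.diff (PySem.Set.ofList
        ['a','b','c','d','e','f','g','h','i','j','k','l','m','n','o','p','q','r','s','t','u','v','w','x','y','z']) st.2) (fun x => x)
      = List.filter (fun x => !PySem.Set.contains st.2 x)
        ['a','b','c','d','e','f','g','h','i','j','k','l','m','n','o','p','q','r','s','t','u','v','w','x','y','z'] := by
    apply PySem.List.sorted_eq_of_perm_of_pairwise_lt
    · exact List.Perm.refl _
    · exact List.Pairwise.filter _ (by decide)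
  rw [hnum, hlet]
  have huniv : ("0123456789abcdefghijklmnopqrstuvwxyz").toList
      = ['0','1','2','3','4','5','6','7','8','9'] ++ ['a','b','c','d','e','f','g','h','i','j','k','l','m','n','o','p','q','r','s','t','u','v','w','x','y','z'] := rfl
  rw [huniv, List.filter_append]
  congr 1
  congr 1
  · have hmap : ([0,1,2,3,4,5,6,7,8,9] : List Int) = ['0','1','2','3','4','5','6','7','8','9'].map pvDigitVal := by rfl
    rw [hmap]
    apply flatMap_filter_map
    intro c hc
    refine ⟨by fin_cases hc <;> rfl, ?_⟩
    rw [hmem1 c hc]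
  · rw [List.flatMap_singleton']
    apply List.filter_congr
    intro c hc
    rw [hmem2 c hc]
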